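-- pv_equiv track=rewrite | github.com/dawid27xx/webCrawler-cwk | crawler.py | computeSubPhrases
-- ===== SOURCE A (Python) =====
-- def computeSubPhrases(query):
--     # Generate all subphrases of 2+ words from the query
--     words = query.split()
--     n = len(words)
--     subphrases = []
--
--     for length in range(2, n):
--         for start in range(n - length + 1):
--             subphrase = ' '.join(words[start:start + length])
--             subphrases.append(subphrase)
--
--     return subphrases
-- ===== SOURCE B (Python) =====
-- def computeSubPhrases(query):
--     # Build phrases incrementally by length: each row extends the
--     # previous-length row by one more word, avoiding re-slicing/re-joining.
--     words = query.split()
--     n = len(words)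
--     subphrases = []
--     prev = words
--     for length in range(2, n):
--         prev = [prev[start] + ' ' + words[start + length - 1]
--                 for start in range(n - length + 1)]
--         subphrases.extend(prev)
--     return subphrases
-- ===== Notes on version B (the rewrite author's own statement) =====
-- stated objective: alternative
-- what changed: B builds each length-L phrase row incrementally from the length-(L-1) row (prev[start] + ' ' + one new word) instead of re-slicing and re-joining words[start:start+length] for every phrase.
import Mathlib
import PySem

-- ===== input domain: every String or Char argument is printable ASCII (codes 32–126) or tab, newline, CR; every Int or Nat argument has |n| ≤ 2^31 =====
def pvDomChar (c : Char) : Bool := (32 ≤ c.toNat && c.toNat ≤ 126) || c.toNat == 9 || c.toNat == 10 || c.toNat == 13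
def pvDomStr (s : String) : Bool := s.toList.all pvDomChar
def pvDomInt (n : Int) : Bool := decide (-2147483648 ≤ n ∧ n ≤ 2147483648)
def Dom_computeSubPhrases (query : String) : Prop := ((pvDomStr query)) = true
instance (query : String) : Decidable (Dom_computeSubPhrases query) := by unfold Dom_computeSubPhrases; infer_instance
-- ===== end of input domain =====

-- B builds the length-L phrases incrementally from the length-(L-1) row instead of
-- re-slicing and re-joining the word list for every phrase (alternative decomposition).

-- ===== PORT A =====
def computeSubPhrases (query : String) : List String :=
  let words := PySem.Str.split₀ query
  let n := PySem.List.len words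
  (PySem.List.pyRange 2 n 1).foldl (fun subphrases length =>
    (PySem.List.pyRange 0 (n - length + 1) 1).foldl (fun acc start =>
      acc ++ [PySem.Str.join " " (PySem.List.slice words (some start) (some (start + length)))])
      subphrases) []

-- ===== PORT B =====
def computeSubPhrases_alt (query : String) : List String :=
  let words := PySem.Str.split₀ query
  let n := PySem.List.len words
  ((PySem.List.pyRange 2 n 1).foldl (fun (st : List String × List String) length =>
      let row := (PySem.List.pyRange 0 (n - length + 1) 1).map (fun start =>
        PySem.List.pyGetD st.1 start "" ++ " " ++ PySem.List.pyGetD words (start + length - 1) "")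
      (row, st.2 ++ row)) (words, [])).2

-- ===== PRECONDITION & SPEC =====
def Spec_computeSubPhrases (query : String) (out : List String) : Prop := out = computeSubPhrases_alt query
instance (query : String) (out : List String) : Decidable (Spec_computeSubPhrases query out) := by unfold Spec_computeSubPhrases; infer_instance

-- ===== CLAIM (what is proved, stated in full; the proofs are below) =====
def Claim_equal_computeSubPhrases : Prop := ∀ (query : String), Dom_computeSubPhrases query → Spec_computeSubPhrases query (computeSubPhrases query)

-- ===== LEMMAS AND PROOFS =====

-- the row of all phrases of a given word-length L (A's slice/join form)
def pvRow (words : List String) (L : Int) : List String :=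
  (PySem.List.pyRange 0 (PySem.List.len words - L + 1) 1).map (fun start =>
    PySem.Str.join " " (PySem.List.slice words (some start) (some (start + L))))

theorem pv_chars_join_append_singleton (sep y : List Char) :
    ∀ (ys : List (List Char)), ys ≠ [] →
      PySem.Chars.join sep (ys ++ [y]) = PySem.Chars.join sep ys ++ sep ++ y := by
  intro ys
  induction ys with
  | nil => intro h; exact absurd rfl h
  | cons p rest ih =>
    intro _
    cases rest with
    | nil =>
      simp [PySem.Chars.join, List.intercalate]
    | cons q rest' =>
      have := ih (by simp)
      simp only [List.cons_append] at this ⊢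
      rw [PySem.Chars.join_cons_cons, PySem.Chars.join_cons_cons, this]
      simp [List.append_assoc]

theorem pv_join_append_singleton (sep y : String) (ys : List String) (h : ys ≠ []) :
    PySem.Str.join sep (ys ++ [y]) = PySem.Str.join sep ys ++ sep ++ y := by
  apply String.ext
  simp only [PySem.Str.toList_join, String.toList_append, List.map_append, List.map_cons,
    List.map_nil]
  exact pv_chars_join_append_singleton _ _ _ (by simpa using h)

theorem pv_join_singleton (sep y : String) : PySem.Str.join sep [y] = y := by
  apply String.ext
  simp [PySem.Str.toList_join, PySem.Chars.join, List.intercalate]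

theorem pv_row_one (words : List String) : pvRow words 1 = words := by
  unfold pvRow
  simp only [PySem.List.len_eq, sub_add_cancel]
  have hcong : ∀ s ∈ PySem.List.pyRange 0 (words.length : Int) 1,
      PySem.Str.join " " (PySem.List.slice words (some s) (some (s + 1)))
        = PySem.List.pyGetD words s "" := by
    intro s hs
    rw [PySem.List.mem_pyRange_one] at hs
    obtain ⟨h0, h1⟩ := hs
    have hj : s.toNat < words.length := by omega
    rw [PySem.List.slice_toNat words h0 (by omega)]
    have h2 : (s + 1).toNat - s.toNat = 1 := by omega
    rw [h2, PySem.List.pyGetD_eq_getElem words "" h0 h1]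
    rw [List.drop_eq_getElem_cons hj]
    rw [show List.take 1 (words[s.toNat] :: List.drop (s.toNat + 1) words) = [words[s.toNat]] from rfl]
    exact pv_join_singleton _ _
  rw [List.map_congr_left hcong]
  exact PySem.List.map_pyGetD_pyRange_zero words ""

theorem pv_join_take_succ (ws : List String) (j k : Nat) (hk : 1 ≤ k) (h : j + k < ws.length) :
    PySem.Str.join " " (List.take k (List.drop j ws)) ++ " " ++ ws[j + k] =
      PySem.Str.join " " (List.take (k + 1) (List.drop j ws)) := by
  have hlt : k < (List.drop j ws).length := by simp; omega
  have hget : (List.drop j ws)[k]'hlt = ws[j + k] := by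
    rw [List.getElem_drop]
  have htake : List.take (k + 1) (List.drop j ws)
      = List.take k (List.drop j ws) ++ [ws[j + k]] := by
    rw [List.take_add_one]
    congr 1
    rw [List.getElem?_eq_getElem hlt, hget]
    rfl
  have hne : List.take k (List.drop j ws) ≠ [] := by
    have hpos : 0 < (List.take k (List.drop j ws)).length := by
      simp only [List.length_take, List.length_drop]; omega
    exact List.ne_nil_of_length_pos hpos
  rw [htake, pv_join_append_singleton _ _ _ hne]

theorem pv_row_step (words : List String) (a : Int) (h2 : 2 ≤ a)
    (hn : a < (words.length : Int)) :
    (PySem.List.pyRange 0 ((words.length : Int) - a + 1) 1).map (fun start =>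
        PySem.List.pyGetD (pvRow words (a - 1)) start ""
          ++ " " ++ PySem.List.pyGetD words (start + a - 1) "")
      = pvRow words a := by
  unfold pvRow
  simp only [PySem.List.len_eq]
  apply List.map_congr_left
  intro s hs
  rw [PySem.List.mem_pyRange_one] at hs
  obtain ⟨h0, h1⟩ := hs
  rw [PySem.List.pyGetD_map_pyRange_of_nonneg _ _ _ _ h0 (by omega)]
  rw [PySem.List.pyGetD_eq_getElem words "" (by omega) (by omega)]
  rw [PySem.List.slice_toNat words h0 (by omega), PySem.List.slice_toNat words h0 (by omega)]
  have e1 : (s + (a - 1)).toNat - s.toNat = (a - 1).toNat := by omega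
  have e2 : (s + a).toNat - s.toNat = (a - 1).toNat + 1 := by omega
  have e3 : (s + a - 1).toNat = s.toNat + (a - 1).toNat := by omega
  rw [e1, e2]
  simp only [e3]
  exact pv_join_take_succ words s.toNat (a - 1).toNat (by omega) (by omega)

theorem pv_main (words : List String) :
    ∀ (k : Nat) (a : Int) (acc : List String), 2 ≤ a → ((words.length : Int) - a).toNat = k →
    ((PySem.List.pyRange a (PySem.List.len words) 1).foldl
        (fun (st : List String × List String) length =>
          let row := (PySem.List.pyRange 0 (PySem.List.len words - length + 1) 1).map
            (fun start => PySem.List.pyGetD st.1 start ""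
              ++ " " ++ PySem.List.pyGetD words (start + length - 1) "")
          (row, st.2 ++ row)) (pvRow words (a - 1), acc)).2
      = (PySem.List.pyRange a (PySem.List.len words) 1).foldl (fun subphrases length =>
          (PySem.List.pyRange 0 (PySem.List.len words - length + 1) 1).foldl (fun acc2 start =>
            acc2 ++ [PySem.Str.join " "
              (PySem.List.slice words (some start) (some (start + length)))]) subphrases) acc := by
  intro k
  induction k with
  | zero =>
    intro a acc h2 hk
    rw [PySem.List.len_eq, PySem.List.pyRange_one_eq_nil (by omega)]
    rfl
  | succ m ih =>
    intro a acc h2 hk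
    have hlt : a < (words.length : Int) := by omega
    rw [PySem.List.len_eq, PySem.List.pyRange_one_cons hlt]
    simp only [List.foldl_cons]
    rw [PySem.List.foldl_append_singleton_eq_map]
    have hrow : (PySem.List.pyRange 0 ((words.length : Int) - a + 1) 1).map (fun start =>
        PySem.List.pyGetD (pvRow words (a - 1)) start ""
          ++ " " ++ PySem.List.pyGetD words (start + a - 1) "") = pvRow words a := by
      exact pv_row_step words a h2 hlt
    have hrowA : (PySem.List.pyRange 0 ((words.length : Int) - a + 1) 1).map (fun start =>
        PySem.Str.join " " (PySem.List.slice words (some start) (some (start + a))))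
        = pvRow words a := by
      unfold pvRow; simp [PySem.List.len_eq]
    rw [hrow, hrowA]
    have := ih (a + 1) (acc ++ pvRow words a) (by omega) (by omega)
    simp only [PySem.List.len_eq, add_sub_cancel_right] at this
    exact this

-- ===== VERDICT (by name: the statement is the Claim_ definition above) =====
theorem computeSubPhrases_spec : Claim_equal_computeSubPhrases := by
  intro query _
  unfold Spec_computeSubPhrases
  simp only [computeSubPhrases, computeSubPhrases_alt]
  have h := pv_main (PySem.Str.split₀ query)
    (((PySem.Str.split₀ query).length : Int) - 2).toNat 2 [] (by omega) rfl
  rw [show (2 : Int) - 1 = 1 from by norm_num, pv_row_one] at h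
  exact h.symm
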